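-- pv_equiv track=rewrite | github.com/824zzy/Leetcode | Q_Greedy/TwoPass/L3_2565_Subsequence_With_the_Minimum_Score.py | minimumScore
-- ===== SOURCE A (Python) =====
-- def minimumScore(s: str, t: str) -> int:
--     suffix = [-1] * len(s)
--     j = len(t) - 1
--     for i in reversed(range(len(s))):
--         if 0 <= j and s[i] == t[j]:
--             j -= 1
--         suffix[i] = j
--     ans = j + 1
--     j = 0
--     for i, ch in enumerate(s):
--         ans = min(ans, max(0, suffix[i] - j + 1))
--         if j < len(t) and s[i] == t[j]:
--             j += 1
--     return min(ans, len(t) - j)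
-- ===== SOURCE B (Python) =====
-- def _positions(s, t):
--     """pos[p] = minimal number of characters of s whose prefix contains t[:p]
--     as a subsequence (greedy earliest match), for every matchable p."""
--     pos = [0]
--     i = 0
--     for c in t:
--         i = s.find(c, i)
--         if i < 0:
--             break
--         i += 1
--         pos.append(i)
--     return pos
--
--
-- def minimumScore(s: str, t: str) -> int:
--     n, m = len(s), len(t)
--     pos = _positions(s, t)
--     # rpos[q] = maximal start index such that t[m-q:] is a subsequence of s[start:]
--     rpos = [n - x for x in _positions(s[::-1], t[::-1])]
--     # keep t[:p] and t[m-q:]: feasible iff p+q <= m and pos[p] <= rpos[q];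
--     # pos is increasing and rpos decreasing, so a two-pointer merge maximizes p+q
--     best = 0
--     q = len(rpos) - 1
--     for p in range(len(pos)):
--         while q >= 0 and (p + q > m or pos[p] > rpos[q]):
--             q -= 1
--         if q < 0:
--             break
--         if p + q > best:
--             best = p + q
--     return m - best
-- ===== Notes on version B (the rewrite author's own statement) =====
-- stated objective: alternative
-- what changed: A scans s twice building an s-indexed suffix array and streaming a running min of clamped gaps; B instead builds t-indexed match-position arrays pos[p] (earliest prefix of s containing t[:p], via repeated str.find) and rpos[q] (latest start from which t[m-q:] fits, by reusing the same helper on the reversed strings), then maximizes p+q with a two-pointer merge over these two monotone arrays and returns m-best.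
import Mathlib
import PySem

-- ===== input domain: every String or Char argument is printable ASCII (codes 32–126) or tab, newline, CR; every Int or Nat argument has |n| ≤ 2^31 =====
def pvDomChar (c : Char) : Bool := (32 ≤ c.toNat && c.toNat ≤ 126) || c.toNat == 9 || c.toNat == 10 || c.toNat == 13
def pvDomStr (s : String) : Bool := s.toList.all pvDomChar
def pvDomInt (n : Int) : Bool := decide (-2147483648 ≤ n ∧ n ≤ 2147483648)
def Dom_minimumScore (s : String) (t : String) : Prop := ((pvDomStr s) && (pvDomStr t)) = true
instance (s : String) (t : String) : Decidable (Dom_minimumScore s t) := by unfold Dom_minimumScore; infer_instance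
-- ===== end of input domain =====

-- B replaces A's s-indexed suffix array + streaming forward min by t-indexed earliest/latest
-- match-position arrays combined with a two-pointer merge (objective: alternative algorithm).

-- ===== PORT A =====
-- Reverse loop of A: for i in reversed(range(len(s))): if 0<=j and s[i]==t[j]: j-=1; suffix[i]=j.
-- Iterating i from len(s)-1 down to 0 writing suffix[i] once = structural recursion from the
-- right; returns (final j, suffix list).  t[j] is only reached by Python when 0 ≤ j (then j is
-- in range, so getD is exact; when 0 ≤ j fails the conjunction is False either way).
def aRev (tl : List Char) (m : Int) : List Char → (Int × List Int)
  | [] => (m - 1, [])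
  | c :: rest =>
      let p := aRev tl m rest
      let j' := if 0 ≤ p.1 ∧ tl.getD p.1.toNat ' ' = c then p.1 - 1 else p.1
      (j', j' :: p.2)

-- Forward loop of A over (s[i], suffix[i]) pairs, threading (ans, j); t[j] guarded by j < len(t).
def aFwd (tl : List Char) (m : Nat) : List (Char × Int) → Int → Nat → Int × Nat
  | [], ans, j => (ans, j)
  | (c, sv) :: rest, ans, j =>
      aFwd tl m rest (min ans (max 0 (sv - (j : Int) + 1)))
        (if j < m ∧ tl.getD j ' ' = c then j + 1 else j)

def minimumScore (s : String) (t : String) : Int :=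
  let sl := s.toList
  let tl := t.toList
  let m := tl.length
  let p := aRev tl (m : Int) sl
  let r := aFwd tl m (sl.zip p.2) (p.1 + 1) 0
  min r.1 ((m : Int) - (r.2 : Int))

-- ===== PORT B =====
-- s.find(c, i) of Source B, ported by hand (exact): scan the not-yet-consumed tail of s, carrying
-- the absolute index; returns Python's i+1 (the index after the match) with the remaining tail,
-- none when the character is absent (Python's -1 / break).
def seek (c : Char) (i : Nat) : List Char → Option (Nat × List Char)
  | [] => none
  | x :: xs => if x = c then some (i + 1, xs) else seek c (i + 1) xs

-- the for-c-in-t loop of _positions, after the initial [0]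
def posAux (rem : List Char) (i : Nat) : List Char → List Nat
  | [] => []
  | c :: tcs =>
      match seek c i rem with
      | none => []
      | some (i', rem') => i' :: posAux rem' i' tcs

-- _positions(s, t) of Source B
def positions (sl : List Char) (tl : List Char) : List Nat := 0 :: posAux sl 0 tl

-- the inner while of the two-pointer merge: q -= 1 while q >= 0 and (p+q > m or pos[p] > rpos[q])
def shrink (m : Nat) (rpos : List Nat) (pp : Nat) (p : Nat) (q : Int) : Int :=
  if h : 0 ≤ q ∧ ((m : Int) < (p : Int) + q ∨ ((rpos.getD q.toNat 0 : Int) < (pp : Int))) then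
    shrink m rpos pp p (q - 1)
  else q
termination_by (q + 1).toNat
decreasing_by omega

-- the outer for-p loop over pos, threading best and the pointer q
def combine (m : Nat) (rpos : List Nat) : List Nat → Nat → Nat → Int → Nat
  | [], _, best, _ => best
  | pp :: rest, p, best, q =>
      let q' := shrink m rpos pp p q
      if q' < 0 then best
      else combine m rpos rest (p + 1) (max best (p + q'.toNat)) q'

def minimumScore_alt (s : String) (t : String) : Int :=
  let sl := s.toList
  let tl := t.toList
  let n := sl.length
  let m := tl.length
  let pos := positions sl tl
  let rpos := (positions sl.reverse tl.reverse).map (fun x => n - x)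
  (m : Int) - (combine m rpos pos 0 0 ((rpos.length : Int) - 1) : Int)

-- ===== PRECONDITION & SPEC =====
def Spec_minimumScore (s : String) (t : String) (out : Int) : Prop := out = minimumScore_alt s t
instance (s : String) (t : String) (out : Int) : Decidable (Spec_minimumScore s t out) := by unfold Spec_minimumScore; infer_instance

-- ===== CLAIM (what is proved, stated in full; the proofs are below) =====
def Claim_equal_minimumScore : Prop := ∀ (s : String) (t : String), Dom_minimumScore s t → Spec_minimumScore s t (minimumScore s t)

-- ===== LEMMAS AND PROOFS =====

-- A's (and the analysis') greedy step: one character against forward pointer j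
def gstep (m : Nat) (tl : List Char) (j : Nat) (c : Char) : Nat :=
  if j < m ∧ tl.getD j ' ' = c then j + 1 else j

-- forward greedy match count of t in sl
def gcnt (tl : List Char) (sl : List Char) : Nat := sl.foldl (gstep tl.length tl) 0

-- backward greedy of A's reverse loop, reformulated as counts (k = matched from t's end)
def sufList (tl : List Char) (m : Nat) : List Char → (Nat × List Nat)
  | [] => (0, [])
  | c :: rest =>
      let p := sufList tl m rest
      let k' := if p.1 < m ∧ tl.getD (m - 1 - p.1) ' ' = c then p.1 + 1 else p.1
      (k', k' :: p.2)

-- The list of split pairs (forward count before position i, backward count from position i).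
def Zl (tl : List Char) (m : Nat) : List Char → Nat → List (Nat × Nat)
  | [], j => [(j, 0)]
  | c :: rest, j => (j, (sufList tl m (c :: rest)).1) :: Zl tl m rest (gstep m tl j c)

theorem sufList_le (tl : List Char) (m : Nat) :
    ∀ sl : List Char, (sufList tl m sl).1 ≤ m
  | [] => by simp [sufList]
  | c :: rest => by
      have h := sufList_le tl m rest
      simp only [sufList]
      split <;> omega

theorem rev_eq (tl : List Char) (m : Nat) :
    ∀ sl : List Char,
      aRev tl (m : Int) sl = (((m : Int) - 1 - ((sufList tl m sl).1 : Int)),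
        (sufList tl m sl).2.map (fun k : Nat => (m : Int) - 1 - (k : Int)))
  | [] => by simp [aRev, sufList]
  | c :: rest => by
      have ih := rev_eq tl m rest
      have hk := sufList_le tl m rest
      simp only [aRev, sufList, ih, List.map_cons]
      by_cases hlt : (sufList tl m rest).1 < m
      · have ht : ((m : Int) - 1 - ((sufList tl m rest).1 : Int)).toNat
            = m - 1 - (sufList tl m rest).1 := by omega
        have hge : (0 : Int) ≤ (m : Int) - 1 - ((sufList tl m rest).1 : Int) := by omega
        by_cases hc : tl.getD (m - 1 - (sufList tl m rest).1) ' ' = c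
        · rw [if_pos (by rw [ht]; exact ⟨hge, hc⟩), if_pos ⟨hlt, hc⟩]
          have he : (m : Int) - 1 - ((sufList tl m rest).1 : Int) - 1
              = (m : Int) - 1 - (((sufList tl m rest).1 + 1 : Nat) : Int) := by push_cast; ring
          rw [he]
        · rw [if_neg (by rw [ht]; tauto), if_neg (by tauto)]
      · have hneg : ¬ ((0:Int) ≤ (m : Int) - 1 - ((sufList tl m rest).1 : Int)) := by omega
        rw [if_neg (by tauto), if_neg (by tauto)]

-- Characterisation of A's forward pass + final min as a single min-fold over the split pairs.
theorem fwd_eq (tl : List Char) (m : Nat) :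
    ∀ (sl : List Char) (j : Nat) (ans : Int), j ≤ m →
      (let r := aFwd tl m (sl.zip ((sufList tl m sl).2.map (fun k : Nat => (m : Int) - 1 - (k : Int)))) ans j
       min r.1 ((m : Int) - (r.2 : Int)))
      = List.foldl (fun a pq => min a (max 0 ((m : Int) - (pq.1 : Int) - (pq.2 : Int)))) ans (Zl tl m sl j)
  | [], j, ans, hj => by
      simp only [sufList, Zl, List.map_nil, List.zip_nil_right, aFwd, List.foldl_cons,
        List.foldl_nil]
      have h : max 0 ((m : Int) - (j : Int) - ((0:Nat) : Int)) = (m : Int) - (j : Int) := by omega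
      rw [h]
  | c :: rest, j, ans, hj => by
      simp only [sufList, Zl, List.map_cons, List.zip_cons_cons, aFwd, List.foldl_cons, gstep]
      generalize hK : (if (sufList tl m rest).1 < m ∧
          tl.getD (m - 1 - (sufList tl m rest).1) ' ' = c then
          (sufList tl m rest).1 + 1 else (sufList tl m rest).1) = K
      generalize hJ : (if j < m ∧ tl.getD j ' ' = c then j + 1 else j) = J
      have hJm : J ≤ m := by rw [← hJ]; split <;> omega
      have ih := fwd_eq tl m rest J
        (min ans (max 0 ((m : Int) - 1 - (K : Int) - (j : Int) + 1))) hJm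
      simp only at ih
      rw [ih]
      congr 1
      omega

-- min-of-clamped-complements fold = m minus max-of-capped-sums fold.
theorem arith_fold (m : Nat) :
    ∀ (L : List (Nat × Nat)) (b : Nat),
      List.foldl (fun a pq => min a (max 0 ((m : Int) - (pq.1 : Int) - (pq.2 : Int)))) ((m : Int) - (b : Int)) L
      = (m : Int) - ((List.foldl (fun x pq => max x (min m (pq.1 + pq.2))) b L : Nat) : Int)
  | [], b => by simp
  | (p, q) :: L, b => by
      have key : min ((m : Int) - (b : Int)) (max 0 ((m : Int) - (p : Int) - (q : Int)))
          = (m : Int) - ((max b (min m (p + q)) : Nat) : Int) := by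
        push_cast; omega
      simp only [List.foldl_cons, key]
      exact arith_fold m L (max b (min m (p + q)))

theorem Zl_head (tl : List Char) (m : Nat) (sl : List Char) (j : Nat) :
    ∃ tail, Zl tl m sl j = (j, (sufList tl m sl).1) :: tail := by
  cases sl with
  | nil => exact ⟨[], by simp [Zl, sufList]⟩
  | cons c rest => exact ⟨_, rfl⟩

-- best kept length on A's side, as the max-fold over the split pairs
def bestA (sl : List Char) (tl : List Char) : Nat :=
  List.foldl (fun x pq => max x (min tl.length (pq.1 + pq.2))) 0 (Zl tl tl.length sl 0)

-- A's result = m - bestA (assembled from the lemmas above)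
theorem A_char (s t : String) :
    minimumScore s t = (t.toList.length : Int) - (bestA s.toList t.toList : Int) := by
  unfold minimumScore
  simp only []
  set sl := s.toList
  set tl := t.toList
  set m := tl.length with hm
  set k0 := (sufList tl m sl).1 with hk0
  have hk0m : k0 ≤ m := sufList_le tl m sl
  rw [rev_eq tl m sl]
  have hstart : ((m : Int) - 1 - (k0 : Int)) + 1 = (m : Int) - (k0 : Int) := by ring
  have hfwd := fwd_eq tl m sl 0 (((m : Int) - 1 - (k0 : Int)) + 1) (Nat.zero_le m)
  simp only at hfwd
  rw [hfwd, hstart]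
  obtain ⟨tail, htail⟩ := Zl_head tl m sl 0
  unfold bestA
  rw [htail]
  simp only [List.foldl_cons]
  have h1 : min ((m : Int) - (k0 : Int)) (max 0 ((m : Int) - ((0:Nat) : Int) - (k0 : Int)))
      = (m : Int) - ((max 0 (min m (0 + k0)) : Nat) : Int) := by push_cast; omega
  rw [h1]
  have h2 : (max 0 (min m (0 + k0)) : Nat) = k0 := by omega
  rw [h2]
  exact arith_fold m tail k0

-- ---------- generic fold-max lemmas ----------
theorem foldl_max_ge_init {α : Type} (g : α → Nat) :
    ∀ (L : List α) (a : Nat), a ≤ L.foldl (fun x y => max x (g y)) a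
  | [], a => le_refl a
  | y :: L, a => le_trans (le_max_left a (g y)) (foldl_max_ge_init g L _)

theorem foldl_max_ge_mem {α : Type} (g : α → Nat) :
    ∀ (L : List α) (a : Nat) (y : α), y ∈ L → g y ≤ L.foldl (fun x z => max x (g z)) a
  | z :: L, a, y, hy => by
      rcases List.mem_cons.mp hy with h | h
      · subst h
        exact le_trans (le_max_right a (g y)) (foldl_max_ge_init g L _)
      · exact foldl_max_ge_mem g L _ y h

theorem foldl_max_le {α : Type} (g : α → Nat) (b : Nat) :
    ∀ (L : List α) (a : Nat), a ≤ b → (∀ y ∈ L, g y ≤ b) →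
      L.foldl (fun x z => max x (g z)) a ≤ b
  | [], a, ha, _ => ha
  | y :: L, a, ha, hL => by
      refine foldl_max_le g b L _ ?_ ?_
      · exact max_le ha (hL y (List.mem_cons_self))
      · exact fun z hz => hL z (List.mem_cons_of_mem _ hz)

-- ---------- seek / positions ----------
theorem seek_none (c : Char) : ∀ (sl : List Char) (i : Nat), seek c i sl = none → ∀ x ∈ sl, x ≠ c
  | [], _, _, x, hx => by simp at hx
  | y :: ys, i, h, x, hx => by
      by_cases hyc : y = c
      · simp [seek, hyc] at h
      · rcases List.mem_cons.mp hx with h1 | h1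
        · exact h1 ▸ hyc
        · exact seek_none c ys (i+1) (by simpa [seek, hyc] using h) x h1

theorem seek_some (c : Char) :
    ∀ (sl : List Char) (i k : Nat) (rem : List Char), seek c i sl = some (k, rem) →
      ∃ pre, sl = pre ++ c :: rem ∧ (∀ x ∈ pre, x ≠ c) ∧ k = i + pre.length + 1
  | [], _, _, _, h => by simp [seek] at h
  | y :: ys, i, k, rem, h => by
      by_cases hyc : y = c
      · simp only [seek, if_pos hyc, Option.some.injEq, Prod.mk.injEq] at h
        exact ⟨[], by simp [hyc, h.2], by simp, by simp; omega⟩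
      · obtain ⟨pre, h1, h2, h3⟩ := seek_some c ys (i+1) k rem (by simpa [seek, hyc] using h)
        exact ⟨y :: pre, by simp [h1], by
          intro x hx
          rcases List.mem_cons.mp hx with h4 | h4
          · exact h4 ▸ hyc
          · exact h2 x h4, by simp [h3]; omega⟩

theorem seek_shift (c : Char) :
    ∀ (sl : List Char) (i : Nat),
      seek c i sl = (seek c 0 sl).map (fun p => (p.1 + i, p.2))
  | [], _ => rfl
  | x :: xs, i => by
      by_cases hxc : x = c
      · simp [seek, hxc, Nat.add_comm]
      · simp only [seek, if_neg hxc]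
        rw [seek_shift c xs (i+1), seek_shift c xs 1, Option.map_map]
        congr 1
        funext p
        simp
        omega

theorem posAux_shift :
    ∀ (tcs rem : List Char) (i : Nat),
      posAux rem i tcs = (posAux rem 0 tcs).map (fun x => x + i)
  | [], _, _ => rfl
  | c :: tcs, rem, i => by
      simp only [posAux]
      rw [seek_shift c rem i]
      cases h : seek c 0 rem with
      | none => simp
      | some p =>
          obtain ⟨k, rem'⟩ := p
          simp only [Option.map_some, List.map_cons]
          rw [posAux_shift tcs rem' (k + i), posAux_shift tcs rem' k, List.map_map]
          exact congrArg (List.cons (k + i))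
            (List.map_congr_left (fun x _ => by simp [Function.comp]; omega))

-- all entries of posAux rem i tcs are ≤ i + rem.length
theorem posAux_le :
    ∀ (tcs rem : List Char) (i : Nat), ∀ x ∈ posAux rem i tcs, x ≤ i + rem.length
  | [], _, _, x, hx => by simp [posAux] at hx
  | c :: tcs, rem, i, x, hx => by
      simp only [posAux] at hx
      cases h : seek c i rem with
      | none => simp [h] at hx
      | some p =>
          obtain ⟨k, rem'⟩ := p
          obtain ⟨pre, h1, _, h3⟩ := seek_some c rem i k rem' h
          have hlen : k + rem'.length = i + rem.length := by
            subst h1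
            simp only [List.length_append, List.length_cons]
            omega
          rw [h] at hx
          rcases List.mem_cons.mp hx with h4 | h4
          · omega
          · have := posAux_le tcs rem' k x h4
            omega

theorem positions_le (sl tl : List Char) : ∀ x ∈ positions sl tl, x ≤ sl.length := by
  intro x hx
  rcases List.mem_cons.mp hx with h | h
  · omega
  · simpa using posAux_le tl sl 0 x h

-- foldl of gstep stays put on a list free of the next awaited character
theorem gcnt_stuck (m : Nat) (c : Char) (tcs : List Char) :
    ∀ (l : List Char), (∀ x ∈ l, x ≠ c) →
      l.foldl (gstep m (c :: tcs)) 0 = 0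
  | [], _ => rfl
  | x :: xs, h => by
      have hx : x ≠ c := h x (List.mem_cons_self)
      have : gstep m (c :: tcs) 0 x = 0 := by
        simp [gstep]
        intro _
        exact fun hc => absurd hc.symm hx
      rw [List.foldl_cons, this]
      exact gcnt_stuck m c tcs xs (fun y hy => h y (List.mem_cons_of_mem _ hy))

-- shifting the matched count by one against a cons'd pattern
theorem gstep_shift (m : Nat) (c : Char) (tcs : List Char) :
    ∀ (l : List Char) (j : Nat),
      l.foldl (gstep (m + 1) (c :: tcs)) (j + 1) = (l.foldl (gstep m tcs) j) + 1
  | [], _ => rfl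
  | x :: xs, j => by
      have : gstep (m + 1) (c :: tcs) (j + 1) x = (gstep m tcs j x) + 1 := by
        simp only [gstep, List.getD_cons_succ]
        split_ifs with h1 h2 h2 <;> first | rfl |
          (exfalso; exact h2 ⟨by omega, h1.2⟩) | (exfalso; exact h1 ⟨by omega, h2.2⟩)
      rw [List.foldl_cons, this, List.foldl_cons]
      exact gstep_shift m c tcs xs (gstep m tcs j x)

-- THE GALOIS LEMMA: p-th earliest-match position ≤ i  ⟺  greedy count on s[:i] reaches p
theorem galois :
    ∀ (tl sl : List Char) (p i : Nat),
      (p < (positions sl tl).length ∧ (positions sl tl).getD p 0 ≤ i) ↔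
        p ≤ gcnt tl (sl.take i) := by
  intro tl
  induction tl with
  | nil =>
      intro sl p i
      have hg : gcnt [] (sl.take i) = 0 := by
        unfold gcnt
        induction sl.take i with
        | nil => rfl
        | cons x xs ih => simpa [List.foldl_cons, gstep] using ih
      constructor
      · rintro ⟨hp, _⟩
        simp [positions, posAux] at hp
        omega
      · intro hp
        rw [hg] at hp
        interval_cases p
        simp [positions, posAux]
  | cons c tcs ih =>
      intro sl p i
      cases hseek : seek c 0 sl with
      | none =>
          have hfree := seek_none c sl 0 hseek
          have hg : gcnt (c :: tcs) (sl.take i) = 0 :=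
            gcnt_stuck _ c tcs _ (fun x hx => hfree x (List.mem_of_mem_take hx))
          constructor
          · rintro ⟨hp, _⟩
            simp [positions, posAux, hseek] at hp
            omega
          · intro hp
            rw [hg] at hp
            interval_cases p
            simp [positions]
      | some pr =>
          obtain ⟨k, rem⟩ := pr
          obtain ⟨pre, hsl, hpre, hk⟩ := seek_some c sl 0 k rem hseek
          have hk' : k = pre.length + 1 := by omega
          have hpos : positions sl (c :: tcs) = 0 :: (positions rem tcs).map (fun x => x + k) := by
            simp only [positions, posAux, hseek, List.map_cons, Nat.zero_add]
            rw [posAux_shift tcs rem k]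
          by_cases hi : i ≤ pre.length
          · -- take i sl is inside the c-free prefix: greedy stuck at 0
            have htake : sl.take i = pre.take i := by
              subst hsl
              rw [List.take_append]
              have : i - pre.length = 0 := by omega
              simp [this]
            have hg : gcnt (c :: tcs) (sl.take i) = 0 := by
              rw [htake]
              exact gcnt_stuck _ c tcs _ (fun x hx => hpre x (List.mem_of_mem_take hx))
            rw [hg, hpos]
            constructor
            · rintro ⟨hp, hle⟩
              match p with
              | 0 => exact le_refl 0
              | p' + 1 =>
                  exfalso
                  simp only [List.length_cons, List.length_map] at hp
                  have hp' : p' < (positions rem tcs).length := by omega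
                  have : (((positions rem tcs).map (fun x => x + k)).getD p' 0) ≤ i := by
                    simpa [List.getD_cons_succ] using hle
                  rw [List.getD_eq_getElem _ _ (by simpa using hp')] at this
                  simp only [List.getElem_map] at this
                  omega
            · intro hp
              interval_cases p
              exact ⟨by simp, by simp⟩
          · -- take i sl passes the first c: count = 1 + count on the remainder
            have htake : sl.take i = pre ++ c :: rem.take (i - pre.length - 1) := by
              subst hsl
              rw [List.take_append]
              have h1 : pre.take i = pre := List.take_of_length_le (by omega)
              have h2 : i - pre.length = (i - pre.length - 1) + 1 := by omega
              rw [h1, h2, List.take_succ_cons]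
              simp
            have hg : gcnt (c :: tcs) (sl.take i) = gcnt tcs (rem.take (i - pre.length - 1)) + 1 := by
              unfold gcnt
              rw [htake, List.foldl_append]
              have hpre0 : pre.foldl (gstep (c :: tcs).length (c :: tcs)) 0 = 0 :=
                gcnt_stuck _ c tcs pre hpre
              rw [hpre0, List.foldl_cons]
              have hone : gstep (c :: tcs).length (c :: tcs) 0 c = 1 := by
                simp [gstep]
              rw [hone]
              have := gstep_shift tcs.length c tcs (rem.take (i - pre.length - 1)) 0
              simpa [List.length_cons] using this
            rw [hg, hpos]
            match p with
            | 0 => simp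
            | p' + 1 =>
                have ihspec := ih rem p' (i - pre.length - 1)
                constructor
                · rintro ⟨hp, hle⟩
                  simp only [List.length_cons, List.length_map] at hp
                  have hp' : p' < (positions rem tcs).length := by omega
                  have hle' : ((positions rem tcs).map (fun x => x + k)).getD p' 0 ≤ i := by
                    simpa [List.getD_cons_succ] using hle
                  rw [List.getD_eq_getElem _ _ (by simpa using hp')] at hle'
                  simp only [List.getElem_map] at hle'
                  have : (positions rem tcs).getD p' 0 ≤ i - pre.length - 1 := by
                    rw [List.getD_eq_getElem _ _ hp']
                    omega
                  have := ihspec.mp ⟨hp', this⟩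
                  omega
                · intro hp
                  have hp' : p' ≤ gcnt tcs (rem.take (i - pre.length - 1)) := by omega
                  obtain ⟨h1, h2⟩ := ihspec.mpr hp'
                  refine ⟨by simp only [List.length_cons, List.length_map]; omega, ?_⟩
                  have : (((positions rem tcs).map (fun x => x + k)).getD p' 0) ≤ i := by
                    rw [List.getD_eq_getElem _ _ (by simpa using h1)]
                    simp only [List.getElem_map]
                    rw [List.getD_eq_getElem _ _ h1] at h2
                    omega
                  simpa [List.getD_cons_succ] using this

-- corollaries of galois
theorem pos_self (tl sl : List Char) (p : Nat) (hp : p < (positions sl tl).length) :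
    p ≤ gcnt tl (sl.take ((positions sl tl).getD p 0)) :=
  (galois tl sl p _).mp ⟨hp, le_refl _⟩

theorem pos_mono (tl sl : List Char) (p' p : Nat) (hp : p < (positions sl tl).length)
    (h : p' ≤ p) : (positions sl tl).getD p' 0 ≤ (positions sl tl).getD p 0 :=
  ((galois tl sl p' _).mpr (le_trans h (pos_self tl sl p hp))).2

-- greedy count never exceeds |t|
theorem gcnt_le_aux (m : Nat) (tl : List Char) :
    ∀ (l : List Char) (j : Nat), j ≤ m → l.foldl (gstep m tl) j ≤ m
  | [], _, h => h
  | x :: xs, j, h => by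
      refine gcnt_le_aux m tl xs _ ?_
      simp only [gstep]
      split <;> omega

-- backward greedy count = forward greedy count on the reversed strings
theorem suf_rev (tl : List Char) :
    ∀ sl : List Char, (sufList tl tl.length sl).1 = gcnt tl.reverse sl.reverse
  | [] => by simp [sufList, gcnt]
  | c :: rest => by
      have ih := suf_rev tl rest
      simp only [sufList, List.reverse_cons]
      unfold gcnt
      rw [List.foldl_append]
      have hrev : ∀ k, k < tl.length →
          tl.reverse.getD k ' ' = tl.getD (tl.length - 1 - k) ' ' := by
        intro k hk
        rw [List.getD_eq_getElem _ _ (by simpa using hk),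
            List.getD_eq_getElem _ _ (by omega)]
        simp [List.getElem_reverse]
      show (if (sufList tl tl.length rest).1 < tl.length ∧
            tl.getD (tl.length - 1 - (sufList tl tl.length rest).1) ' ' = c
          then (sufList tl tl.length rest).1 + 1 else (sufList tl tl.length rest).1)
        = List.foldl (gstep tl.reverse.length tl.reverse)
            (rest.reverse.foldl (gstep tl.reverse.length tl.reverse) 0) [c]
      rw [show (rest.reverse.foldl (gstep tl.reverse.length tl.reverse) 0)
            = gcnt tl.reverse rest.reverse from rfl, ← ih]
      simp only [List.foldl_cons, List.foldl_nil, gstep, List.length_reverse]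
      by_cases h1 : (sufList tl tl.length rest).1 < tl.length
      · rw [hrev _ h1]
      · rw [if_neg (by tauto), if_neg (by tauto)]

-- membership of the i-th split pair in Zl
theorem Zl_mem (tl : List Char) (m : Nat) :
    ∀ (sl : List Char) (j i : Nat), i ≤ sl.length →
      ((sl.take i).foldl (gstep m tl) j, (sufList tl m (sl.drop i)).1) ∈ Zl tl m sl j
  | sl, j, 0, _ => by
      obtain ⟨tail, htail⟩ := Zl_head tl m sl j
      rw [htail]
      simp
  | c :: rest, j, i + 1, hi => by
      have := Zl_mem tl m rest (gstep m tl j c) i (by simpa using hi)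
      simp only [Zl, List.take_succ_cons, List.drop_succ_cons, List.foldl_cons]
      exact List.mem_cons_of_mem _ this

-- every element of Zl is a split pair
theorem Zl_elem (tl : List Char) (m : Nat) :
    ∀ (sl : List Char) (j : Nat) (pq : Nat × Nat), pq ∈ Zl tl m sl j →
      ∃ i, i ≤ sl.length ∧
        pq = ((sl.take i).foldl (gstep m tl) j, (sufList tl m (sl.drop i)).1)
  | [], j, pq, h => by
      simp only [Zl, List.mem_singleton] at h
      exact ⟨0, by simp, by simpa [sufList] using h⟩
  | c :: rest, j, pq, h => by
      rcases List.mem_cons.mp h with h1 | h1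
      · exact ⟨0, by simp, by simpa using h1⟩
      · obtain ⟨i, hi, heq⟩ := Zl_elem tl m rest (gstep m tl j c) pq h1
        exact ⟨i + 1, by simpa using hi, by simpa [List.foldl_cons] using heq⟩

-- ---------- (sl.drop i).reverse = sl.reverse.take (n - i) ----------
theorem drop_reverse (sl : List Char) (i : Nat) :
    (sl.drop i).reverse = sl.reverse.take (sl.length - i) := by
  rcases le_or_gt i sl.length with h | h
  · rw [List.reverse_drop]
  · rw [List.drop_of_length_le (by omega)]
    rw [show sl.length - i = 0 by omega]
    simp

-- ---------- shrink lemmas ----------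
theorem shrink_le (m : Nat) (rpos : List Nat) (pp p : Nat) :
    ∀ q : Int, shrink m rpos pp p q ≤ q := by
  intro q
  unfold shrink
  split
  · have := shrink_le m rpos pp p (q - 1)
    omega
  · exact le_refl q
termination_by q => (q + 1).toNat
decreasing_by omega

theorem shrink_stop (m : Nat) (rpos : List Nat) (pp p : Nat) :
    ∀ q : Int, 0 ≤ shrink m rpos pp p q →
      p + (shrink m rpos pp p q).toNat ≤ m ∧
        pp ≤ rpos.getD (shrink m rpos pp p q).toNat 0 := by
  intro q
  unfold shrink
  split
  · exact shrink_stop m rpos pp p (q - 1)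
  · rename_i h
    intro hq
    omega
termination_by q => (q + 1).toNat
decreasing_by omega

theorem shrink_disc (m : Nat) (rpos : List Nat) (pp p : Nat) :
    ∀ (q : Int) (q0 : Nat), shrink m rpos pp p q < (q0 : Int) → (q0 : Int) ≤ q →
      m < p + q0 ∨ rpos.getD q0 0 < pp := by
  intro q q0 h1 h2
  unfold shrink at h1
  split at h1
  · rename_i hc
    rcases lt_or_ge ((q0 : Int)) q with hq | hq
    · exact shrink_disc m rpos pp p (q - 1) q0 h1 (by omega)
    · have : (q0 : Int) = q := by omega
      rcases hc.2 with h3 | h3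
      · left; omega
      · right
        have : q.toNat = q0 := by omega
        rw [this] at h3
        omega
  · omega
termination_by q => (q + 1).toNat
decreasing_by omega

-- ---------- combine lemmas ----------
-- soundness: every value maxed into best comes from a feasible pair
theorem combine_le (m : Nat) (rpos pos : List Nat) (B : Nat)
    (hfeas : ∀ p q : Nat, p < pos.length → q < rpos.length → p + q ≤ m →
      pos.getD p 0 ≤ rpos.getD q 0 → p + q ≤ B) :
    ∀ (L : List Nat) (p best : Nat) (q : Int), L = pos.drop p → best ≤ B →
      q < (rpos.length : Int) → combine m rpos L p best q ≤ B
  | [], p, best, q, _, hbest, _ => hbest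
  | pp :: rest, p, best, q, hL, hbest, hq => by
      simp only [combine]
      set q' := shrink m rpos pp p q with hq'
      by_cases hneg : q' < 0
      · rw [if_pos hneg]; exact hbest
      · rw [if_neg hneg]
        have hq'le : q' ≤ q := shrink_le m rpos pp p q
        have hstop := shrink_stop m rpos pp p q (by omega)
        rw [← hq'] at hstop
        have hplen : p < pos.length := by
          by_contra hc
          have h0 : pos.drop p = [] := List.drop_of_length_le (by omega)
          rw [h0] at hL
          exact List.cons_ne_nil pp rest hL
        have hpp : pos.getD p 0 = pp := by
          have h0 : (pos.drop p).getD 0 0 = pp := by rw [← hL]; rfl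
          rwa [List.getD_eq_getElem?_getD, List.getElem?_drop, Nat.add_zero,
              ← List.getD_eq_getElem?_getD] at h0
        refine combine_le m rpos pos B hfeas rest (p + 1) _ q' ?_ ?_ (by omega)
        · rw [← List.tail_drop, ← hL]; rfl
        · refine max_le hbest (hfeas p q'.toNat hplen (by omega) hstop.1 ?_)
          rw [hpp]
          exact hstop.2

-- completeness: the two-pointer merge dominates every feasible pair
theorem combine_ge (m : Nat) (rpos pos : List Nat)
    (hmono : ∀ p' p : Nat, p < pos.length → p' ≤ p → pos.getD p' 0 ≤ pos.getD p 0) :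
    ∀ (L : List Nat) (p best : Nat) (q : Int), L = pos.drop p →
      (∀ q0 : Nat, q < (q0 : Int) → q0 < rpos.length → ∀ p0 : Nat, p ≤ p0 → p0 < pos.length →
        m < p0 + q0 ∨ rpos.getD q0 0 < pos.getD p0 0) →
      (∀ p0 q0 : Nat, p0 < p → p0 < pos.length → q0 < rpos.length → p0 + q0 ≤ m →
        pos.getD p0 0 ≤ rpos.getD q0 0 → p0 + q0 ≤ best) →
      ∀ p1 q1 : Nat, p1 < pos.length → q1 < rpos.length → p1 + q1 ≤ m →
        pos.getD p1 0 ≤ rpos.getD q1 0 → p1 + q1 ≤ combine m rpos L p best q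
  | [], p, best, q, hL, _, hdone, p1, q1, h1, h2, h3, h4 => by
      have : pos.length ≤ p := by
        by_contra hc
        have : pos.drop p ≠ [] := by
          apply List.ne_nil_of_length_pos
          rw [List.length_drop]
          omega
        exact this hL.symm
      exact hdone p1 q1 (by omega) h1 h2 h3 h4
  | pp :: rest, p, best, q, hL, hdisc, hdone, p1, q1, h1, h2, h3, h4 => by
      simp only [combine]
      set q' := shrink m rpos pp p q with hq'
      have hplen : p < pos.length := by
        by_contra hc
        have h0 : pos.drop p = [] := List.drop_of_length_le (by omega)
        rw [h0] at hL
        exact List.cons_ne_nil pp rest hL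
      have hpp : pos.getD p 0 = pp := by
        have h0 : (pos.drop p).getD 0 0 = pp := by rw [← hL]; rfl
        rwa [List.getD_eq_getElem?_getD, List.getElem?_drop, Nat.add_zero,
            ← List.getD_eq_getElem?_getD] at h0
      have hq'le : q' ≤ q := shrink_le m rpos pp p q
      -- after shrinking, every q0 > q' is infeasible for every p0 ≥ p
      have hdisc' : ∀ q0 : Nat, q' < (q0 : Int) → q0 < rpos.length →
          ∀ p0 : Nat, p ≤ p0 → p0 < pos.length →
            m < p0 + q0 ∨ rpos.getD q0 0 < pos.getD p0 0 := by
        intro q0 hq0 hq0len p0 hp0 hp0len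
        rcases lt_or_ge q ((q0 : Int)) with hgt | hle
        · exact hdisc q0 hgt hq0len p0 hp0 hp0len
        · have := shrink_disc m rpos pp p q q0 (by omega) hle
          rcases this with h | h
          · left; omega
          · right
            calc rpos.getD q0 0 < pp := h
              _ = pos.getD p 0 := hpp.symm
              _ ≤ pos.getD p0 0 := hmono p p0 hp0len hp0
      by_cases hneg : q' < 0
      · rw [if_pos hneg]
        -- no feasible pair remains with p1 ≥ p; all are covered by hdone
        rcases lt_or_ge p1 p with hcase | hcase
        · exact hdone p1 q1 hcase h1 h2 h3 h4
        · exfalso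
          have := hdisc' q1 (by omega) h2 p1 hcase h1
          omega
      · rw [if_neg hneg]
        refine combine_ge m rpos pos hmono rest (p + 1) _ q'
          ?_ ?_ ?_ p1 q1 h1 h2 h3 h4
        · rw [← List.tail_drop, ← hL]; rfl
        · intro q0 hq0 hq0len p0 hp0 hp0len
          exact hdisc' q0 hq0 hq0len p0 (by omega) hp0len
        · intro p0 q0 hp0 hp0len hq0len hpq hle
          rcases lt_or_ge p0 p with hcase | hcase
          · exact le_trans (hdone p0 q0 hcase hp0len hq0len hpq hle) (le_max_left _ _)
          · have hp0p : p0 = p := by omega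
            subst hp0p
            have hq0le : q0 ≤ q'.toNat := by
              by_contra hc
              have := hdisc' q0 (by omega) hq0len p0 (le_refl _) hp0len
              omega
            calc p0 + q0 ≤ p0 + q'.toNat := by omega
              _ ≤ max best (p0 + q'.toNat) := le_max_right _ _

-- best kept length on B's side
def bestB (sl : List Char) (tl : List Char) : Nat :=
  combine tl.length ((positions sl.reverse tl.reverse).map (fun x => sl.length - x))
    (positions sl tl) 0 0
    ((((positions sl.reverse tl.reverse).map (fun x => sl.length - x)).length : Int) - 1)

-- rpos entry unfolding
theorem rpos_getD (sl tl : List Char) (q : Nat)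
    (hq : q < (positions sl.reverse tl.reverse).length) :
    ((positions sl.reverse tl.reverse).map (fun x => sl.length - x)).getD q 0
      = sl.length - (positions sl.reverse tl.reverse).getD q 0 := by
  rw [List.getD_eq_getElem _ _ (by simpa using hq), List.getD_eq_getElem _ _ hq]
  simp

-- every feasible (p, q) pair is dominated by bestA
theorem feas_le_bestA (sl tl : List Char) (p q : Nat)
    (hp : p < (positions sl tl).length)
    (hq : q < ((positions sl.reverse tl.reverse).map (fun x => sl.length - x)).length)
    (hpq : p + q ≤ tl.length)
    (hle : (positions sl tl).getD p 0
      ≤ ((positions sl.reverse tl.reverse).map (fun x => sl.length - x)).getD q 0) :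
    p + q ≤ bestA sl tl := by
  set n := sl.length with hn
  set m := tl.length with hm
  set i := (positions sl tl).getD p 0 with hi
  have hq' : q < (positions sl.reverse tl.reverse).length := by simpa using hq
  have hin : i ≤ n := by
    have : i ∈ positions sl tl := by
      rw [hi, List.getD_eq_getElem _ _ hp]
      exact List.getElem_mem hp
    exact positions_le sl tl i this
  have hRq : (positions sl.reverse tl.reverse).getD q 0 ≤ sl.reverse.length := by
    have : (positions sl.reverse tl.reverse).getD q 0 ∈ positions sl.reverse tl.reverse := by
      rw [List.getD_eq_getElem _ _ hq']
      exact List.getElem_mem hq'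
    exact positions_le _ _ _ this
  rw [rpos_getD sl tl q hq'] at hle
  -- R.getD q ≤ n - i
  have hR : (positions sl.reverse tl.reverse).getD q 0 ≤ n - i := by
    simp only [List.length_reverse] at hRq
    omega
  -- forward: p ≤ pre_i
  have hpre : p ≤ gcnt tl (sl.take i) := pos_self tl sl p hp
  -- backward: q ≤ suf_i
  have hsuf : q ≤ (sufList tl m (sl.drop i)).1 := by
    rw [hm, suf_rev tl (sl.drop i), drop_reverse]
    exact ((galois tl.reverse sl.reverse q (n - i)).mp ⟨hq', hR⟩)
  -- the i-th split pair is in Zl and dominates p + q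
  have hmem := Zl_mem tl m sl 0 i hin
  have hg := foldl_max_ge_mem (fun pq : Nat × Nat => min m (pq.1 + pq.2))
    (Zl tl m sl 0) 0 _ hmem
  unfold bestA
  refine le_trans ?_ hg
  simp only []
  have : p + q ≤ ((sl.take i).foldl (gstep m tl) 0 + (sufList tl m (sl.drop i)).1) := by
    have : gcnt tl (sl.take i) = (sl.take i).foldl (gstep m tl) 0 := by rw [gcnt, hm]
    omega
  omega

-- every split pair's capped sum is dominated by bestB
theorem split_le_bestB (sl tl : List Char) (pq : Nat × Nat)
    (hmem : pq ∈ Zl tl tl.length sl 0) :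
    min tl.length (pq.1 + pq.2) ≤ bestB sl tl := by
  set n := sl.length with hn
  set m := tl.length with hm
  obtain ⟨i, hin, heq⟩ := Zl_elem tl m sl 0 pq hmem
  set a := (sl.take i).foldl (gstep m tl) 0 with ha
  set b := (sufList tl m (sl.drop i)).1 with hb
  have ham : a ≤ m := by rw [ha, hm]; exact gcnt_le_aux _ tl _ 0 (Nat.zero_le _)
  have hbm : b ≤ m := sufList_le tl m _
  have hga : gcnt tl (sl.take i) = a := by unfold gcnt; exact ha.symm
  -- choose the kept pair (p, q)
  set p := min a (m - b) with hp
  set q := b with hqdef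
  have hpa : p ≤ a := min_le_left _ _
  have hsum : p + q = min m (a + b) := by omega
  -- feasibility of (p, q)
  have hpre : p ≤ gcnt tl (sl.take i) := by omega
  obtain ⟨hplen, hple⟩ := (galois tl sl p i).mpr hpre
  have hsufq : q ≤ gcnt tl.reverse (sl.reverse.take (n - i)) := by
    rw [← drop_reverse, ← suf_rev tl (sl.drop i)]
  obtain ⟨hqlen, hqle⟩ := (galois tl.reverse sl.reverse q (n - i)).mpr hsufq
  -- two-pointer completeness gives p + q ≤ bestB
  have hside : (positions sl tl).getD p 0
      ≤ ((positions sl.reverse tl.reverse).map (fun x => n - x)).getD q 0 := by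
    rw [rpos_getD sl tl q hqlen]
    have hR : (positions sl.reverse tl.reverse).getD q 0 ≤ n - i := hqle
    have hip : (positions sl tl).getD p 0 ≤ i := hple
    have hi2 : i ≤ n := hin
    omega
  have hge := combine_ge m ((positions sl.reverse tl.reverse).map (fun x => n - x))
    (positions sl tl) (fun p' p hplen' h => pos_mono tl sl p' p hplen' h)
    (positions sl tl) 0 0
    ((((positions sl.reverse tl.reverse).map (fun x => n - x)).length : Int) - 1)
    (by simp)
    (by intro q0 hq0 hq0len p0 _ _
        exfalso
        simp only [List.length_map] at hq0len hq0
        omega)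
    (by intro p0 q0 h; omega)
    p q hplen (by simpa using hqlen) (by omega) hside
  rw [heq]
  show min m (a + b) ≤ bestB sl tl
  rw [hsum] at hge
  unfold bestB
  exact hge

-- bestA = bestB
theorem best_eq (sl tl : List Char) : bestA sl tl = bestB sl tl := by
  apply le_antisymm
  · unfold bestA
    exact foldl_max_le _ _ _ 0 (Nat.zero_le _)
      (fun pq hpq => split_le_bestB sl tl pq hpq)
  · unfold bestB
    refine combine_le tl.length _ (positions sl tl) (bestA sl tl) ?_
      (positions sl tl) 0 0 _ (by simp) (Nat.zero_le _) (by omega)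
    intro p q hp hq hpq hle
    exact feas_le_bestA sl tl p q hp hq hpq hle

-- B's port = m - bestB (unfolding the lets)
theorem B_char (s t : String) :
    minimumScore_alt s t = (t.toList.length : Int) - (bestB s.toList t.toList : Int) := rfl

-- ===== VERDICT (by name: the statement is the Claim_ definition above) =====
theorem minimumScore_spec : Claim_equal_minimumScore := by
  intro s t _
  unfold Spec_minimumScore
  rw [A_char, B_char, best_eq]
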